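-- pv_equiv track=rewrite | github.com/jlevin1729/index_tracking | quantum_layer/butterfly.py | tomography_qubits
-- ===== SOURCE A (Python) =====
-- import enum
--
-- class TomographyVariant(str, enum.Enum):
--     NO_OFFSET = "NO_OFFSET"
--     OFFSET = "OFFSET"
--     BARE = "BARE"
--
-- def tomography_qubits(num_qubits):
--     no_offset_index_range = num_qubits // 2
--     offset_index_range = num_qubits // 2
--     if num_qubits % 2 == 0:
--         offset_index_range -= 1
--
--     no_offset = [[2 * i, 2 * i + 1] for i in range(no_offset_index_range)]
--     offset = [[2 * i + 1, 2 * i + 2] for i in range(offset_index_range)]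
--
--     return {TomographyVariant.NO_OFFSET: no_offset, TomographyVariant.OFFSET: offset}
-- ===== SOURCE B (Python) =====
-- import enum
--
-- class TomographyVariant(str, enum.Enum):
--     NO_OFFSET = "NO_OFFSET"
--     OFFSET = "OFFSET"
--     BARE = "BARE"
--
-- def tomography_qubits(num_qubits):
--     # One stride-1 pass over all adjacent pairs, split by parity of the start index.
--     no_offset = []
--     offset = []
--     for j in range(num_qubits - 1):
--         if j % 2 == 0:
--             no_offset.append([j, j + 1])
--         else:
--             offset.append([j, j + 1])
--     return {TomographyVariant.NO_OFFSET: no_offset, TomographyVariant.OFFSET: offset}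
-- ===== Notes on version B (the rewrite author's own statement) =====
-- stated objective: alternative
-- what changed: Replaces A's two independent stride-2 index comprehensions (i -> [2i,2i+1] / [2i+1,2i+2]) with a single stride-1 pass over all adjacent pairs [j,j+1], partitioned by the parity of j.
import Mathlib
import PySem

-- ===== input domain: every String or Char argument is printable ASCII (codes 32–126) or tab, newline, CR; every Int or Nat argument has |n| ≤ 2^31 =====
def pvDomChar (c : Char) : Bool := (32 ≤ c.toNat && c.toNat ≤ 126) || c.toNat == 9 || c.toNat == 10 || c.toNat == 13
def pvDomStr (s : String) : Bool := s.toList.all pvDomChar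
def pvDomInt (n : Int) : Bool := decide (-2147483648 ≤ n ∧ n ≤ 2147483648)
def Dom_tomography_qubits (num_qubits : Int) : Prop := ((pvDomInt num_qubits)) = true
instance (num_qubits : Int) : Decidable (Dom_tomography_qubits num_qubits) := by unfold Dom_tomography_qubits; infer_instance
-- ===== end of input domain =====

-- B replaces A's two stride-2 comprehensions by one stride-1 pass over adjacent pairs split by parity (alternative decomposition, same cost).

-- ===== PORT A =====
def tomography_qubits (num_qubits : Int) : List (String × List (List Int)) :=
  let no_offset_index_range := PySem.Int.floordiv num_qubits 2
  let offset_index_range0 := PySem.Int.floordiv num_qubits 2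
  let offset_index_range :=
    if PySem.Int.mod num_qubits 2 == 0 then offset_index_range0 - 1 else offset_index_range0
  let no_offset := (PySem.List.pyRange 0 no_offset_index_range 1).map (fun i => [2*i, 2*i+1])
  let offset := (PySem.List.pyRange 0 offset_index_range 1).map (fun i => [2*i+1, 2*i+2])
  [("NO_OFFSET", no_offset), ("OFFSET", offset)]

-- ===== PORT B =====
def tomography_qubits_alt (num_qubits : Int) : List (String × List (List Int)) :=
  let p := (PySem.List.pyRange 0 (num_qubits - 1) 1).foldl
    (fun (acc : List (List Int) × List (List Int)) j =>
      if PySem.Int.mod j 2 == 0 then (acc.1 ++ [[j, j+1]], acc.2)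
      else (acc.1, acc.2 ++ [[j, j+1]]))
    ([], [])
  [("NO_OFFSET", p.1), ("OFFSET", p.2)]

-- ===== PRECONDITION & SPEC =====
def Spec_tomography_qubits (num_qubits : Int) (out : List (String × List (List Int))) : Prop := out = tomography_qubits_alt num_qubits
instance (num_qubits : Int) (out : List (String × List (List Int))) : Decidable (Spec_tomography_qubits num_qubits out) := by unfold Spec_tomography_qubits; infer_instance

-- ===== CLAIM (what is proved, stated in full; the proofs are below) =====
def Claim_equal_tomography_qubits : Prop := ∀ (num_qubits : Int), Dom_tomography_qubits num_qubits → Spec_tomography_qubits num_qubits (tomography_qubits num_qubits)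

-- ===== LEMMAS AND PROOFS =====

-- The parity partition of range m equals the two stride-2 comprehensions.
lemma pv_part_eq (m : Nat) :
    (PySem.List.pyRange 0 (m : Int) 1).foldl
      (fun (acc : List (List Int) × List (List Int)) j =>
        if PySem.Int.mod j 2 == 0 then (acc.1 ++ [[j, j+1]], acc.2)
        else (acc.1, acc.2 ++ [[j, j+1]]))
      ([], []) =
    ((PySem.List.pyRange 0 (((m+1)/2 : Nat) : Int) 1).map (fun i => [2*i, 2*i+1]),
     (PySem.List.pyRange 0 ((m/2 : Nat) : Int) 1).map (fun i => [2*i+1, 2*i+2])) := by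
  induction m with
  | zero => decide
  | succ m ih =>
    have h1 : ((m+1 : Nat) : Int) = (m : Int) + 1 := by push_cast; ring
    rw [h1, PySem.List.pyRange_one_succ_right (by positivity), List.foldl_append, ih]
    have hmod : PySem.Int.mod (m : Int) 2 = ((m % 2 : Nat) : Int) := by
      rw [PySem.Int.mod_eq_emod_of_pos (by norm_num)]; omega
    rcases Nat.mod_two_eq_zero_or_one m with hp | hp
    · -- m even: the new pair [m, m+1] goes to the NO_OFFSET list
      have e1 : (m+1+1)/2 = (m+1)/2 + 1 := by omega
      have e2 : (m+1)/2 = m/2 := by omega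
      simp only [List.foldl, hmod, hp, e1, e2, Nat.cast_zero, beq_self_eq_true, if_pos]
      have e3 : ((m/2 + 1 : Nat) : Int) = ((m/2 : Nat) : Int) + 1 := by push_cast; ring
      have e4 : ([2*((m/2:Nat):Int), 2*((m/2:Nat):Int)+1] : List Int) = [(m:Int), (m:Int)+1] := by
        simp only [List.cons.injEq, and_true]; omega
      rw [e3, PySem.List.pyRange_one_succ_right (by omega)]
      simp only [List.map_append, List.map_singleton]
      rw [e4]
    · -- m odd: the new pair [m, m+1] goes to the OFFSET list
      have e1 : (m+1+1)/2 = (m+1)/2 := by omega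
      have e2 : (m+1)/2 = m/2 + 1 := by omega
      have hne : ¬ (((m % 2 : Nat) : Int) == 0) = true := by simp [hp]
      simp only [List.foldl, hmod, if_neg hne, e1, e2]
      have e3 : ((m/2 + 1 : Nat) : Int) = ((m/2 : Nat) : Int) + 1 := by push_cast; ring
      have e4 : ([2*((m/2:Nat):Int)+1, 2*((m/2:Nat):Int)+2] : List Int) = [(m:Int), (m:Int)+1] := by
        simp only [List.cons.injEq, and_true]; omega
      rw [e3, PySem.List.pyRange_one_succ_right (by omega)]
      simp only [List.map_append, List.map_singleton]
      rw [e4]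

-- ===== VERDICT (by name: the statement is the Claim_ definition above) =====
theorem tomography_qubits_spec : Claim_equal_tomography_qubits := by
  intro n _
  unfold Spec_tomography_qubits tomography_qubits tomography_qubits_alt
  rcases le_or_gt n 0 with hn | hn
  · -- all ranges are empty
    have hf : PySem.Int.floordiv n 2 = n / 2 := PySem.Int.floordiv_eq_ediv_of_pos (by norm_num)
    have h2 : n / 2 ≤ 0 := by omega
    simp only [hf]
    rw [PySem.List.pyRange_one_eq_nil (by omega : n - 1 ≤ 0),
        PySem.List.pyRange_one_eq_nil (by omega : n / 2 ≤ 0)]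
    split
    · rw [PySem.List.pyRange_one_eq_nil (by omega : n / 2 - 1 ≤ 0)]; rfl
    · rw [PySem.List.pyRange_one_eq_nil (by omega : n / 2 ≤ 0)]; rfl
  · -- n ≥ 1: write n = m + 1 and use the partition lemma
    obtain ⟨m, hm⟩ : ∃ m : Nat, n = (m : Int) + 1 := ⟨(n-1).toNat, by omega⟩
    subst hm
    have hrange : (m : Int) + 1 - 1 = (m : Int) := by ring
    rw [hrange, pv_part_eq]
    have hf : PySem.Int.floordiv ((m : Int) + 1) 2 = (((m+1)/2 : Nat) : Int) := by
      rw [PySem.Int.floordiv_eq_ediv_of_pos (by norm_num)]; omega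
    have hmod : PySem.Int.mod ((m : Int) + 1) 2 = (((m+1) % 2 : Nat) : Int) := by
      rw [PySem.Int.mod_eq_emod_of_pos (by norm_num)]; omega
    simp only [hf, hmod]
    rcases Nat.mod_two_eq_zero_or_one (m+1) with hp | hp
    · have hoff : (((m+1)/2 : Nat) : Int) - 1 = ((m/2 : Nat) : Int) := by omega
      simp only [hp, Nat.cast_zero, beq_self_eq_true, if_pos, hoff]
    · have hne : ¬ ((((m+1) % 2 : Nat) : Int) == 0) = true := by simp [hp]
      have hoff : (((m+1)/2 : Nat) : Int) = ((m/2 : Nat) : Int) := by omega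
      simp only [if_neg hne, hoff]
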